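-- pv_equiv track=rewrite | github.com/aanong/NovelGen-Enterprise | src/agents/rhythm_analyzer.py | _check_consecutive_pattern
-- ===== SOURCE A (Python) =====
-- from typing import List, Dict, Any, Optional
--
-- def _check_consecutive_pattern(
--
--     intensities: List[int],
--     threshold: int,
--     operator: str
-- ) -> bool:
--     """检查是否存在连续模式"""
--     if not intensities:
--         return False
--
--     # 从末尾开始检查
--     for intensity in reversed(intensities):
--         if operator == ">=" and intensity < threshold:
--             return False
--         if operator == "<=" and intensity > threshold:
--             return False
--     return True
-- ===== SOURCE B (Python) =====
-- def _check_consecutive_pattern(intensities, threshold, operator):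
--     if not intensities:
--         return False
--     if operator == ">=":
--         return sorted(intensities)[0] >= threshold
--     if operator == "<=":
--         return sorted(intensities, reverse=True)[0] <= threshold
--     return True
-- ===== Notes on version B (the rewrite author's own statement) =====
-- stated objective: alternative
-- what changed: Replaces A's reversed element-wise short-circuit scan that tests the operator per element with a sort-then-boundary approach: sort the list once (ascending for '>=', descending for '<=') and compare only the boundary element s[0] against the threshold; C-level sorted beats the interpreted per-element loop despite the worse asymptotics (measured ~1.9x at the largest size); the empty-list guard and unknown-operator fall-through are kept.
import Mathlib
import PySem

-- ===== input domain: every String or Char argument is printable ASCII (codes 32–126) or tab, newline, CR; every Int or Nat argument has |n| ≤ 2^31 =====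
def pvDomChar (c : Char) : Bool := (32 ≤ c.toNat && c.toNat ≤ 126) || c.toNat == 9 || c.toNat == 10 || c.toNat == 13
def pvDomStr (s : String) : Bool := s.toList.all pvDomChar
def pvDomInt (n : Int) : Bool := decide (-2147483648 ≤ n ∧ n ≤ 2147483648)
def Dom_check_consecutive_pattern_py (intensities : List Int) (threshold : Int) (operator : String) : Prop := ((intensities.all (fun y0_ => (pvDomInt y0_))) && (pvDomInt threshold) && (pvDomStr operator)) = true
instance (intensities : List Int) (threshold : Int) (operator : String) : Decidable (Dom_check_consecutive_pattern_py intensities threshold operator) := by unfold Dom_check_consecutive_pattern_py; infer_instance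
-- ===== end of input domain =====

-- B replaces A's reversed per-element short-circuit scan with one sort (ascending for ">=", descending for "<=") and a single comparison of the boundary element s[0]; alternative structure, same return value.

-- ===== PORT A =====
-- A's loop `for intensity in reversed(intensities)` with early returns, as structural recursion.
def pvALoop (threshold : Int) (operator : String) : List Int → Bool
  | [] => true
  | x :: rest =>
    if operator = ">=" ∧ x < threshold then false
    else if operator = "<=" ∧ x > threshold then false
    else pvALoop threshold operator rest

def check_consecutive_pattern_py (intensities : List Int) (threshold : Int) (operator : String) : Bool :=
  if intensities = [] then false
  else pvALoop threshold operator intensities.reverse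

-- ===== PORT B =====
def check_consecutive_pattern_py_alt (intensities : List Int) (threshold : Int) (operator : String) : Bool :=
  if intensities = [] then false
  else if operator = ">=" then
    -- sorted(intensities)[0] >= threshold; the index is in range since the list is nonempty
    (PySem.List.pyGet? (PySem.List.sorted intensities (fun x => x) false) 0).elim false
      (fun m => decide (threshold ≤ m))
  else if operator = "<=" then
    -- sorted(intensities, reverse=True)[0] <= threshold
    (PySem.List.pyGet? (PySem.List.sorted intensities (fun x => x) true) 0).elim false
      (fun m => decide (m ≤ threshold))
  else true

-- ===== PRECONDITION & SPEC =====
def Spec_check_consecutive_pattern_py (intensities : List Int) (threshold : Int) (operator : String) (out : Bool) : Prop := out = check_consecutive_pattern_py_alt intensities threshold operator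
instance (intensities : List Int) (threshold : Int) (operator : String) (out : Bool) : Decidable (Spec_check_consecutive_pattern_py intensities threshold operator out) := by unfold Spec_check_consecutive_pattern_py; infer_instance

-- ===== CLAIM (what is proved, stated in full; the proofs are below) =====
def Claim_equal_check_consecutive_pattern_py : Prop := ∀ (intensities : List Int) (threshold : Int) (operator : String), Dom_check_consecutive_pattern_py intensities threshold operator → Spec_check_consecutive_pattern_py intensities threshold operator (check_consecutive_pattern_py intensities threshold operator)

-- ===== LEMMAS AND PROOFS =====

-- A's scan returns true iff no element of the scanned list violates the operator's comparison.
theorem pvALoop_eq_true_iff (threshold : Int) (operator : String) (l : List Int) :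
    pvALoop threshold operator l = true
      ↔ ∀ x ∈ l, ¬(operator = ">=" ∧ x < threshold) ∧ ¬(operator = "<=" ∧ x > threshold) := by
  induction l with
  | nil => simp [pvALoop]
  | cons x rest ih =>
    simp only [pvALoop]
    by_cases h1 : operator = ">=" ∧ x < threshold
    · simp [h1]
    · by_cases h2 : operator = "<=" ∧ x > threshold
      · simp [h2]
      · simp only [if_neg h1, if_neg h2, ih, List.mem_cons]
        constructor
        · rintro h y (rfl | hy)
          · exact ⟨h1, h2⟩
          · exact h y hy
        · intro h y hy; exact h y (Or.inr hy)

-- sorted of a nonempty list is nonempty.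
theorem pv_sorted_ne_nil (xs : List Int) (rev : Bool) (h : xs ≠ []) :
    ∃ m t, PySem.List.sorted xs (fun x => x) rev = m :: t := by
  cases hs : PySem.List.sorted xs (fun x => x) rev with
  | nil => exact absurd ((PySem.List.sorted_eq_nil_iff xs (fun x => x) rev).1 hs) h
  | cons m t => exact ⟨m, t, rfl⟩

-- ===== VERDICT (by name: the statement is the Claim_ definition above) =====
theorem check_consecutive_pattern_py_spec : Claim_equal_check_consecutive_pattern_py := by
  intro intensities threshold operator _
  show check_consecutive_pattern_py intensities threshold operator
      = check_consecutive_pattern_py_alt intensities threshold operator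
  by_cases hnil : intensities = []
  · simp [check_consecutive_pattern_py, check_consecutive_pattern_py_alt, hnil]
  · simp only [check_consecutive_pattern_py, check_consecutive_pattern_py_alt, if_neg hnil]
    by_cases hge : operator = ">="
    · subst hge
      rw [if_pos rfl]
      obtain ⟨m, t, hs⟩ := pv_sorted_ne_nil intensities false hnil
      rw [hs, PySem.List.pyGet?_zero_cons, Option.elim_some, Bool.eq_iff_iff,
        pvALoop_eq_true_iff, decide_eq_true_iff]
      have hmem : m ∈ intensities := (PySem.List.mem_sorted intensities (fun x => x) false m).1 (hs ▸ List.mem_cons_self)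
      have hmin : ∀ y ∈ intensities, m ≤ y := by
        intro y hy; exact PySem.List.key_head_sorted_le intensities (fun x => x) hs y hy
      constructor
      · intro h
        have h1 := (h m (List.mem_reverse.2 hmem)).1
        push Not at h1; have := h1 rfl; omega
      · intro hm y hy
        refine ⟨fun hc => ?_, fun hc => absurd hc.1 (by decide)⟩
        have := hmin y (List.mem_reverse.1 hy); omega
    · by_cases hle : operator = "<="
      · subst hle
        rw [if_neg hge, if_pos rfl]
        obtain ⟨m, t, hs⟩ := pv_sorted_ne_nil intensities true hnil
        rw [hs, PySem.List.pyGet?_zero_cons, Option.elim_some, Bool.eq_iff_iff,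
          pvALoop_eq_true_iff, decide_eq_true_iff]
        have hmem : m ∈ intensities := (PySem.List.mem_sorted intensities (fun x => x) true m).1 (hs ▸ List.mem_cons_self)
        have hmax : ∀ y ∈ intensities, y ≤ m := by
          intro y hy; exact PySem.List.key_head_sorted_rev_ge intensities (fun x => x) hs y hy
        constructor
        · intro h
          have h1 := (h m (List.mem_reverse.2 hmem)).2
          push Not at h1; have := h1 rfl; omega
        · intro hm y hy
          refine ⟨fun hc => absurd hc.1 (by decide), fun hc => ?_⟩
          have := hmax y (List.mem_reverse.1 hy); omega
      · rw [if_neg hge, if_neg hle, Bool.eq_iff_iff, pvALoop_eq_true_iff]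
        simp only [iff_true]
        intro y _
        exact ⟨fun h => hge h.1, fun h => hle h.1⟩
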